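-- pv_equiv track=rewrite | github.com/bjh-insitro/cell_OS | scripts/experiments/phase0_sentinel_scaffold.py | get_experimental_positions
-- ===== SOURCE A (Python) =====
-- SENTINEL_POSITIONS = [
--     "A02", "A05", "A10",  # Row A (3)
--     "B02", "B06", "B09", "B12",  # Row B (4)
--     "C03", "C06", "C09", "C12",  # Row C (4)
--     "D04", "D07", "D10",  # Row D (3)
--     "E01", "E04", "E07", "E10",  # Row E (4)
--     "F02", "F05", "F08", "F11",  # Row F (4)
--     "G02", "G05", "G08", "G12",  # Row G (4)
--     "H04", "H09",  # Row H (2)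
-- ]
--
-- def get_experimental_positions(plate_format=96, exclusions=None):
--     """
--     Get positions for experimental wells (non-sentinel, non-excluded).
--     Returns 60 positions for Phase 0 V2 (88 available - 28 sentinels).
--     """
--     if exclusions is None:
--         exclusions = {'A01', 'A12', 'H01', 'H12', 'A06', 'A07', 'H06', 'H07'}
--
--     # Generate all positions
--     n_rows = 8 if plate_format == 96 else 16
--     n_cols = 12 if plate_format == 96 else 24
--     rows = [chr(65 + i) for i in range(n_rows)]
--
--     all_positions = [f"{row}{col:02d}" for row in rows for col in range(1, n_cols + 1)]
--
--     # Filter out excluded and sentinel positions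
--     sentinel_positions_set = set(SENTINEL_POSITIONS)
--     experimental_positions = [
--         pos for pos in all_positions
--         if pos not in exclusions and pos not in sentinel_positions_set
--     ]
--
--     return experimental_positions
-- ===== SOURCE B (Python) =====
-- SENTINEL_POSITIONS = [
--     "A02", "A05", "A10",
--     "B02", "B06", "B09", "B12",
--     "C03", "C06", "C09", "C12",
--     "D04", "D07", "D10",
--     "E01", "E04", "E07", "E10",
--     "F02", "F05", "F08", "F11",
--     "G02", "G05", "G08", "G12",
--     "H04", "H09",
-- ]
--
--
-- def get_experimental_positions(plate_format=96, exclusions=None):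
--     """Work in coordinate space instead of string space: parse each forbidden
--     label once into a (row, col) pair, collect the pairs in a blocked-cell set,
--     then walk the grid emitting labels for unblocked cells.  No string
--     membership tests during the grid walk."""
--     if exclusions is None:
--         exclusions = {'A01', 'A12', 'H01', 'H12', 'A06', 'A07', 'H06', 'H07'}
--     n_rows, n_cols = (8, 12) if plate_format == 96 else (16, 24)
--
--     def parse(label):
--         # exact inverse of the f"{row}{col:02d}" formatting on this grid
--         if len(label) == 3 and label[1].isdigit() and label[2].isdigit():
--             r = ord(label[0]) - 65
--             c = 10 * (ord(label[1]) - 48) + (ord(label[2]) - 48)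
--             if 0 <= r < n_rows and 1 <= c <= n_cols:
--                 return (r, c)
--         return None
--
--     blocked = {p for s in SENTINEL_POSITIONS for p in [parse(s)] if p}
--     blocked |= {p for s in exclusions for p in [parse(s)] if p}
--
--     out = []
--     for r in range(n_rows):
--         for c in range(1, n_cols + 1):
--             if (r, c) not in blocked:
--                 out.append(f"{chr(65 + r)}{c:02d}")
--     return out
-- ===== Notes on version B (the rewrite author's own statement) =====
-- stated objective: alternative
-- what changed: B works in coordinate space: each sentinel/exclusion label is parsed once into a (row,col) pair via an exact inverse of the f-string formatting, the pairs form a blocked-cell set, and the grid walk emits labels only for unblocked cells, so no string membership tests happen during the walk.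
import Mathlib
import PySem

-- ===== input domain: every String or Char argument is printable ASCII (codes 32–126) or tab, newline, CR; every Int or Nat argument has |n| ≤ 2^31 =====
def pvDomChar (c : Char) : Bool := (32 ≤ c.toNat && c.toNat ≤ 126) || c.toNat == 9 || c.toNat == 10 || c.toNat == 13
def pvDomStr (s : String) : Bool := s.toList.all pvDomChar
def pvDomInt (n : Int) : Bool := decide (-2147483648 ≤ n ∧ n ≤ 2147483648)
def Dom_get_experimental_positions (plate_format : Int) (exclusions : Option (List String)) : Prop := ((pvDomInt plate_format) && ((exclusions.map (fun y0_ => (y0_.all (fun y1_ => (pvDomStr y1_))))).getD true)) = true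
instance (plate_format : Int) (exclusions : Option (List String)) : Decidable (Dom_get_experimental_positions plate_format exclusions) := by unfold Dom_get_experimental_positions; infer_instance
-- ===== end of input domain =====

-- B works in coordinate space: each forbidden label is parsed once into a (row, col) pair, the
-- pairs form a blocked-cell set, and the grid walk emits labels for unblocked cells (objective:
-- alternative — no string membership tests during the grid walk, at the cost of a parse pass).


-- ===== PORT A =====
def pvSentinels : List String :=
  ["A02", "A05", "A10",
   "B02", "B06", "B09", "B12",
   "C03", "C06", "C09", "C12",
   "D04", "D07", "D10",
   "E01", "E04", "E07", "E10",
   "F02", "F05", "F08", "F11",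
   "G02", "G05", "G08", "G12",
   "H04", "H09"]

-- Python set literal {'A01', …}: only membership/iteration over distinct elements is used, so its Set is exact
def pvDefaultExclusions : List String :=
  PySem.Set.ofList ["A01", "A12", "H01", "H12", "A06", "A07", "H06", "H07"]

-- f"{col:02d}": hand port (no PySem format primitive); exact for the nonnegative columns used here
def pvPad2 (c : Int) : List Char :=
  let ds := PySem.Int.toChars c
  if ds.length < 2 then '0' :: ds else ds

def get_experimental_positions (plate_format : Int) (exclusions : Option (List String)) : List String :=
  let excl : List String := match exclusions with
    | none => pvDefaultExclusions
    | some l => l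
  let n_rows : Int := if plate_format == 96 then 8 else 16
  let n_cols : Int := if plate_format == 96 then 12 else 24
  let rows : List String := (PySem.List.pyRange 0 n_rows 1).map (fun i => String.ofList [Char.ofNat (65 + i).toNat])
  let all_positions : List String :=
    rows.flatMap (fun row => (PySem.List.pyRange 1 (n_cols + 1) 1).map (fun col => String.ofList (row.toList ++ pvPad2 col)))
  let sentinel_positions_set : PySem.Set String := PySem.Set.ofList pvSentinels
  all_positions.filter (fun pos => !(excl.contains pos) && !(PySem.Set.contains sentinel_positions_set pos))

-- ===== PORT B =====
-- Source B's parse(): '0' ≤ d ≤ '9' ports s[i].isdigit() exactly on the ASCII domain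
def pvParse (n_rows n_cols : Int) (label : String) : Option (Int × Int) :=
  match label.toList with
  | [a, d1, d2] =>
      if ('0' ≤ d1 && d1 ≤ '9') && ('0' ≤ d2 && d2 ≤ '9') then
        let r : Int := (a.toNat : Int) - 65
        let c : Int := 10 * ((d1.toNat : Int) - 48) + ((d2.toNat : Int) - 48)
        if 0 ≤ r && r < n_rows && 1 ≤ c && c ≤ n_cols then some (r, c) else none
      else none
  | _ => none

-- Source B's f"{chr(65+r)}{c:02d}": hand port, exact on the grid's ranges (0 ≤ r, 0 ≤ c ≤ 99)
def pvLabel (r c : Int) : String :=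
  String.ofList [Char.ofNat (65 + r).toNat, Char.ofNat (48 + c / 10).toNat, Char.ofNat (48 + c % 10).toNat]

def get_experimental_positions_alt (plate_format : Int) (exclusions : Option (List String)) : List String :=
  let excl : List String := match exclusions with
    | none => pvDefaultExclusions
    | some l => l
  let n_rows : Int := if plate_format == 96 then 8 else 16
  let n_cols : Int := if plate_format == 96 then 12 else 24
  let blocked : PySem.Set (Int × Int) :=
    PySem.Set.union (PySem.Set.ofList (pvSentinels.filterMap (pvParse n_rows n_cols)))
      (excl.filterMap (pvParse n_rows n_cols))
  (PySem.List.pyRange 0 n_rows 1).flatMap (fun r =>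
    (PySem.List.pyRange 1 (n_cols + 1) 1).filterMap (fun c =>
      if PySem.Set.contains blocked (r, c) then none else some (pvLabel r c)))

-- ===== PRECONDITION & SPEC =====
def Spec_get_experimental_positions (plate_format : Int) (exclusions : Option (List String)) (out : List String) : Prop := out = get_experimental_positions_alt plate_format exclusions
instance (plate_format : Int) (exclusions : Option (List String)) (out : List String) : Decidable (Spec_get_experimental_positions plate_format exclusions out) := by unfold Spec_get_experimental_positions; infer_instance

-- ===== CLAIM (what is proved, stated in full; the proofs are below) =====
def Claim_equal_get_experimental_positions : Prop := ∀ (plate_format : Int) (exclusions : Option (List String)), Dom_get_experimental_positions plate_format exclusions → Spec_get_experimental_positions plate_format exclusions (get_experimental_positions plate_format exclusions)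

-- ===== LEMMAS AND PROOFS =====

-- parse is left-inverse to labelling: a successful parse pins the string down to the canonical label
theorem pvParse_some (n_rows n_cols : Int) (s : String) (r c : Int)
    (h : pvParse n_rows n_cols s = some (r, c)) : s = pvLabel r c := by
  unfold pvParse at h
  rcases hs : s.toList with _ | ⟨a, _ | ⟨d1, _ | ⟨d2, _ | rest⟩⟩⟩ <;> rw [hs] at h <;>
    [simp at h; simp at h; simp at h; skip; simp at h]
  replace h :
      (if (decide ('0' ≤ d1) && decide (d1 ≤ '9') && (decide ('0' ≤ d2) && decide (d2 ≤ '9'))) = true then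
        (if (decide (0 ≤ (a.toNat : Int) - 65) && decide ((a.toNat : Int) - 65 < n_rows) &&
              decide (1 ≤ 10 * ((d1.toNat : Int) - 48) + ((d2.toNat : Int) - 48)) &&
              decide (10 * ((d1.toNat : Int) - 48) + ((d2.toNat : Int) - 48) ≤ n_cols)) = true then
          some ((a.toNat : Int) - 65, 10 * ((d1.toNat : Int) - 48) + ((d2.toNat : Int) - 48))
        else none)
      else none) = some (r, c) := h
  split_ifs at h with hdig hrange
  · simp only [Option.some.injEq, Prod.mk.injEq] at h
    obtain ⟨hr, hc⟩ := h
    simp only [Bool.and_eq_true, decide_eq_true_eq] at hdig hrange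
    obtain ⟨⟨h01, h19⟩, h02, h29⟩ := hdig
    obtain ⟨⟨⟨h0r, hrn⟩, h1c⟩, hcn⟩ := hrange
    rw [Char.le_def] at h01 h19 h02 h29
    have b1 : 48 ≤ d1.toNat := h01
    have b2 : d1.toNat ≤ 57 := h19
    have b3 : 48 ≤ d2.toNat := h02
    have b4 : d2.toNat ≤ 57 := h29
    have ha : a.toNat = (65 + r).toNat := by omega
    have hd1 : d1.toNat = (48 + c / 10).toNat := by omega
    have hd2 : d2.toNat = (48 + c % 10).toNat := by omega
    have hsl : s = String.ofList [a, d1, d2] := by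
      apply String.toList_injective; rw [hs, String.toList_ofList]
    rw [hsl, pvLabel, ← ha, ← hd1, ← hd2, Char.ofNat_toNat, Char.ofNat_toNat, Char.ofNat_toNat]

-- (map f l).filter p written as a filterMap, to align A's shape with B's
theorem pv_filter_map_eq_filterMap {α β : Type} (f : α → β) (p : β → Bool) (l : List α) :
    (l.map f).filter p = l.filterMap (fun a => if p (f a) then some (f a) else none) := by
  induction l with
  | nil => rfl
  | cons x xs ih =>
      simp only [List.map_cons, List.filter_cons, List.filterMap_cons]
      split <;> simp [ih]

-- membership of a cell in a parsed label list equals membership of its canonical label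
theorem pv_mem_filterMap_parse (n_rows n_cols : Int) (L : List String) (r c : Int)
    (hrt : pvParse n_rows n_cols (pvLabel r c) = some (r, c)) :
    ((r, c) ∈ L.filterMap (pvParse n_rows n_cols)) ↔ pvLabel r c ∈ L := by
  rw [List.mem_filterMap]
  constructor
  · rintro ⟨s, hsL, hps⟩
    rwa [pvParse_some n_rows n_cols s r c hps] at hsL
  · intro hL
    exact ⟨pvLabel r c, hL, hrt⟩

-- the generic core: for any exclusion list, A's string filter over the grid equals B's
-- coordinate-set walk, given the grid's labelling/parsing round-trip facts
theorem pv_core (n_rows n_cols : Int) (excl : List String)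
    (hgrid : ∀ r ∈ PySem.List.pyRange 0 n_rows 1, ∀ c ∈ PySem.List.pyRange 1 (n_cols + 1) 1,
      String.ofList (Char.ofNat (65 + r).toNat :: pvPad2 c) = pvLabel r c ∧
      pvParse n_rows n_cols (pvLabel r c) = some (r, c)) :
    (((PySem.List.pyRange 0 n_rows 1).map (fun i => String.ofList [Char.ofNat (65 + i).toNat])).flatMap
        (fun row => (PySem.List.pyRange 1 (n_cols + 1) 1).map (fun col => String.ofList (row.toList ++ pvPad2 col)))).filter
      (fun pos => !(excl.contains pos) && !(PySem.Set.contains (PySem.Set.ofList pvSentinels) pos))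
    = (PySem.List.pyRange 0 n_rows 1).flatMap (fun r =>
        (PySem.List.pyRange 1 (n_cols + 1) 1).filterMap (fun c =>
          if PySem.Set.contains (PySem.Set.union (PySem.Set.ofList (pvSentinels.filterMap (pvParse n_rows n_cols)))
              (excl.filterMap (pvParse n_rows n_cols))) (r, c) then none else some (pvLabel r c))) := by
  rw [List.flatMap_map, List.filter_flatMap]
  apply List.flatMap_congr  -- per-row
  intro r hr
  rw [pv_filter_map_eq_filterMap]
  apply List.filterMap_congr
  intro c hc
  obtain ⟨hlab, hrt⟩ := hgrid r hr c hc
  have hlab' : String.ofList ((String.ofList [Char.ofNat (65 + r).toNat]).toList ++ pvPad2 c) = pvLabel r c := by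
    rw [String.toList_ofList]; exact hlab
  rw [hlab']
  have hb : PySem.Set.contains (PySem.Set.union (PySem.Set.ofList (pvSentinels.filterMap (pvParse n_rows n_cols)))
      (excl.filterMap (pvParse n_rows n_cols))) (r, c)
      = (pvSentinels.contains (pvLabel r c) || excl.contains (pvLabel r c)) := by
    rw [Bool.eq_iff_iff, PySem.Set.contains_iff, PySem.Set.mem_union, PySem.Set.mem_ofList,
      pv_mem_filterMap_parse n_rows n_cols pvSentinels r c hrt,
      pv_mem_filterMap_parse n_rows n_cols excl r c hrt]
    simp
  have hsent : PySem.Set.contains (PySem.Set.ofList pvSentinels) (pvLabel r c)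
      = pvSentinels.contains (pvLabel r c) := by
    rw [Bool.eq_iff_iff, PySem.Set.contains_iff, PySem.Set.mem_ofList]
    simp
  rw [hb, hsent]
  cases hA : pvSentinels.contains (pvLabel r c) <;> cases hB : excl.contains (pvLabel r c) <;> simp

-- round-trip facts for the two concrete grids
set_option maxRecDepth 16000 in
theorem pv_grid96 : ∀ r ∈ PySem.List.pyRange 0 8 1, ∀ c ∈ PySem.List.pyRange 1 (12 + 1) 1,
    String.ofList (Char.ofNat (65 + r).toNat :: pvPad2 c) = pvLabel r c ∧
    pvParse 8 12 (pvLabel r c) = some (r, c) := by decide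

set_option maxRecDepth 16000 in
theorem pv_grid384 : ∀ r ∈ PySem.List.pyRange 0 16 1, ∀ c ∈ PySem.List.pyRange 1 (24 + 1) 1,
    String.ofList (Char.ofNat (65 + r).toNat :: pvPad2 c) = pvLabel r c ∧
    pvParse 16 24 (pvLabel r c) = some (r, c) := by decide

-- ===== VERDICT (by name: the statement is the Claim_ definition above) =====
theorem get_experimental_positions_spec : Claim_equal_get_experimental_positions := by
  intro plate_format exclusions _
  unfold Spec_get_experimental_positions get_experimental_positions get_experimental_positions_alt
  by_cases h : (plate_format == 96) = true <;> simp only [h, if_true, if_false, Bool.false_eq_true]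
  · exact pv_core 8 12 _ pv_grid96
  · exact pv_core 16 24 _ pv_grid384
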